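-- pv_equiv track=rewrite | github.com/kesavan-t-dev/Python | tasks/palindrome.py | check
-- ===== SOURCE A (Python) =====
-- def check(word):
--     def check(start, end):
--         while start < end and not word[start]:
--             start += 1
--         while start < end and not word[end]:
--             end -= 1
--
--         if start >= end:
--             return True
--
--         if word[start] != word[end]:
--             return False
--
--         return check(start + 1, end - 1)
--
--     return check(0, len(word) - 1)
-- ===== SOURCE B (Python) =====
-- def check(word):
--     return word == word[::-1]
-- ===== Notes on version B (the rewrite author's own statement) =====
-- stated objective: idiomatic
-- what changed: The recursive two-pointer helper with (dead) falsy-char skip loops is replaced by the idiomatic closed form word == word[::-1]; a one-character string is never falsy, so A is exactly a palindrome test.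
import Mathlib
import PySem

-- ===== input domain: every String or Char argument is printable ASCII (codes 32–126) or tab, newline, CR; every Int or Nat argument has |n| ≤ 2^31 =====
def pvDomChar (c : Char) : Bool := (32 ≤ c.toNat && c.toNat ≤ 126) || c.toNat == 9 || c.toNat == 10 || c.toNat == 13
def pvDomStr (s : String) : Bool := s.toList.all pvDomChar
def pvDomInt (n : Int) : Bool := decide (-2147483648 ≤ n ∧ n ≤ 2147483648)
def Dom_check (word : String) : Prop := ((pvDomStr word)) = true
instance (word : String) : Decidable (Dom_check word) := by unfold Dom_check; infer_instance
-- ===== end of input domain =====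

-- B replaces A's recursive two-pointer helper (whose falsy-char skip loops are dead code,
-- since a one-character string is never falsy) by the idiomatic `word == word[::-1]`.

-- ===== PORT A =====
-- `not word[i]`: truthiness of the one-character string word[i] (falsy iff its length is 0);
-- the `none` arm is Python's IndexError, unreachable because every use is guarded by start < end
-- with 0 ≤ start and end ≤ len(word) - 1.
def pvFalsy (word : String) (i : Int) : Bool :=
  match PySem.Str.pyGet? word i with
  | some c => ([c] : List Char).isEmpty
  | none => false

-- `while start < end and not word[start]: start += 1`  (fuel only makes the loop total;
-- every call below carries fuel exceeding the possible iteration count)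
def pvSkipLo (word : String) (e : Int) : Nat → Int → Int
  | 0, s => s
  | fuel + 1, s => if s < e ∧ pvFalsy word s = true then pvSkipLo word e fuel (s + 1) else s

-- `while start < end and not word[end]: end -= 1`
def pvSkipHi (word : String) (s : Int) : Nat → Int → Int
  | 0, e => e
  | fuel + 1, e => if s < e ∧ pvFalsy word e = true then pvSkipHi word s fuel (e - 1) else e

-- the inner recursive `check(start, end)` of A (fuel is only a totality guard; `check`
-- passes len(word) + 1, which exceeds the recursion depth, so the 0 arm is never reached)
def pvCheckGo (word : String) : Nat → Int → Int → Bool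
  | 0, _, _ => true
  | fuel + 1, start, stop =>
    let s := pvSkipLo word stop (fuel + 1) start
    let e := pvSkipHi word s (fuel + 1) stop
    if s ≥ e then true
    else
      match PySem.Str.pyGet? word s, PySem.Str.pyGet? word e with
      | some a, some b => if a ≠ b then false else pvCheckGo word fuel (s + 1) (e - 1)
      | _, _ => false  -- IndexError, unreachable: 0 ≤ s < e ≤ len - 1 throughout

def check (word : String) : Bool :=
  pvCheckGo word (PySem.Str.len word + 1).toNat 0 (PySem.Str.len word - 1)

-- ===== PORT B =====
-- `return word == word[::-1]`; the `none` arm of slice? is step 0, unreachable for step -1.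
def check_alt (word : String) : Bool :=
  match PySem.Str.slice? word none none (-1) with
  | some r => word == r
  | none => false

-- ===== PRECONDITION & SPEC =====
def Spec_check (word : String) (out : Bool) : Prop := out = check_alt word
instance (word : String) (out : Bool) : Decidable (Spec_check word out) := by unfold Spec_check; infer_instance

-- ===== CLAIM (what is proved, stated in full; the proofs are below) =====
def Claim_equal_check : Prop := ∀ (word : String), Dom_check word → Spec_check word (check word)

-- ===== LEMMAS AND PROOFS =====

theorem pvFalsy_false (word : String) (i : Int) : pvFalsy word i = false := by
  unfold pvFalsy
  cases PySem.Str.pyGet? word i <;> simp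

theorem pvSkipLo_eq (word : String) (e : Int) (fuel : Nat) (s : Int) :
    pvSkipLo word e fuel s = s := by
  cases fuel <;> simp [pvSkipLo, pvFalsy_false]

theorem pvSkipHi_eq (word : String) (s : Int) (fuel : Nat) (e : Int) :
    pvSkipHi word s fuel e = e := by
  cases fuel <;> simp [pvSkipHi, pvFalsy_false]

theorem pal_short {α : Type} (l : List α) (h : l.length ≤ 1) : l = l.reverse := by
  match l with
  | [] => rfl
  | [a] => rfl

theorem pal_cons_append {α : Type} (a b : α) (xs : List α) :
    ((a :: xs) ++ [b]) = ((a :: xs) ++ [b]).reverse ↔ (a = b ∧ xs = xs.reverse) := by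
  constructor
  · intro h
    have h' : a :: (xs ++ [b]) = b :: (xs.reverse ++ [a]) := by simpa using h
    obtain ⟨hab, ht⟩ := List.cons.inj h'
    obtain ⟨h1, _⟩ := List.append_inj ht (by simp)
    exact ⟨hab, h1⟩
  · rintro ⟨rfl, hxs⟩
    conv_lhs => rw [hxs]
    simp

theorem sub_decomp {α : Type} (l : List α) (i j : Nat) (hij : i < j) (hj : j < l.length) :
    (l.drop i).take (j - i + 1) =
      l[i]'(by omega) :: ((l.drop (i + 1)).take (j - i - 1)) ++ [l[j]'hj] := by
  rw [List.drop_eq_getElem_cons (by omega)]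
  rw [show j - i + 1 = (j - i - 1 + 1) + 1 by omega]
  rw [List.take_succ_cons]
  rw [List.take_add_one]
  have : (l.drop (i + 1))[j - i - 1]? = some (l[j]'hj) := by
    rw [List.getElem?_drop]
    rw [show i + 1 + (j - i - 1) = j by omega]
    simp
  simp [this]

theorem pvCheckGo_eq (word : String) (fuel : Nat) (s e : Int) (hs : 0 ≤ s)
    (he : e < (word.toList.length : Int)) (hfuel : (e - s).toNat < fuel) :
    pvCheckGo word fuel s e =
      decide (((word.toList.drop s.toNat).take (e - s + 1).toNat) =
              ((word.toList.drop s.toNat).take (e - s + 1).toNat).reverse) := by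
  induction fuel generalizing s e with
  | zero => omega
  | succ fuel ih =>
    simp only [pvCheckGo, pvSkipLo_eq, pvSkipHi_eq]
    by_cases hse : s ≥ e
    · simp only [hse, if_pos]
      have hlen : ((word.toList.drop s.toNat).take (e - s + 1).toNat).length ≤ 1 := by
        simp only [List.length_take, List.length_drop]
        omega
      simp [← pal_short _ hlen]
    · have hlt : s < e := by omega
      obtain ⟨k, rfl⟩ : ∃ k : Nat, s = (k : Int) := ⟨s.toNat, by omega⟩
      obtain ⟨m, rfl⟩ : ∃ m : Nat, e = (m : Int) := ⟨e.toNat, by omega⟩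
      have hkm : k < m := by omega
      have hm : m < word.toList.length := by omega
      have hget_s : PySem.Str.pyGet? word (k : Int) = some (word.toList[k]'(by omega)) := by
        simp [List.getElem?_eq_getElem (by omega : k < word.toList.length)]
      have hget_e : PySem.Str.pyGet? word (m : Int) = some (word.toList[m]'hm) := by
        simp [List.getElem?_eq_getElem hm]
      simp only [hse, if_neg, not_false_eq_true, hget_s, hget_e]
      have hdec := sub_decomp word.toList k m hkm hm
      rw [show ((m : Int) - k + 1).toNat = m - k + 1 by omega]
      rw [show (k : Int).toNat = k by omega]
      rw [hdec]
      by_cases hab : word.toList[k]'(by omega) = word.toList[m]'hm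
      · rw [if_neg (by simp [hab])]
        rw [ih ((k : Int) + 1) ((m : Int) - 1) (by omega) (by omega) (by omega)]
        rw [show (((m : Int) - 1) - ((k : Int) + 1) + 1).toNat = m - k - 1 by omega]
        rw [show ((k : Int) + 1).toNat = k + 1 by omega]
        apply Bool.eq_iff_iff.mpr
        simp only [decide_eq_true_eq]
        rw [pal_cons_append]
        simp [hab]
      · rw [if_pos hab]
        symm
        apply decide_eq_false
        rw [pal_cons_append]
        tauto

theorem check_alt_eq (word : String) :
    check_alt word = decide (word.toList = word.toList.reverse) := by
  simp only [check_alt, PySem.Str.slice?_none_none_neg_one]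
  apply Bool.eq_iff_iff.mpr
  simp only [beq_iff_eq, decide_eq_true_eq]
  constructor
  · intro h
    conv_lhs => rw [h]
    simp
  · intro h
    apply String.toList_inj.mp
    simp [← h]

-- ===== VERDICT (by name: the statement is the Claim_ definition above) =====
theorem check_spec : Claim_equal_check := by
  intro word _
  unfold Spec_check check
  have hlen : PySem.Str.len word = (word.toList.length : Int) := by
    simp [PySem.Str.len_eq]
  rw [hlen, pvCheckGo_eq word ((word.toList.length : Int) + 1).toNat 0
      ((word.toList.length : Int) - 1) (by omega) (by omega) (by omega)]
  rw [check_alt_eq]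
  have hsub : (word.toList.drop (0 : Int).toNat).take
      (((word.toList.length : Int) - 1 - 0 + 1).toNat) = word.toList := by
    rw [show (((word.toList.length : Int) - 1 - 0 + 1)).toNat = word.toList.length by omega]
    simp
  rw [hsub]
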